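-- pv_equiv track=rewrite | github.com/tedyted26/Sistemas-recomendacion | main.py | tratamientoBasico
-- ===== SOURCE A (Python) =====
-- def tratamientoBasico(tokens):
--     caracteres = "0123456789ºª!·$%&/()=|@#~€¬'?¡¿`+^*[]´¨}{,.-;:_<>\n \""
--     listaTratada = []
--     for token in tokens :
--         for i in range (len(caracteres)):
--             token = token.replace(caracteres[i],"")
--         if(token != ""):
--             listaTratada.append(token.lower())
--     tokens.sort()
--     return listaTratada
-- ===== SOURCE B (Python) =====
-- def tratamientoBasico(tokens):
--     delset = frozenset("0123456789ºª!·$%&/()=|@#~€¬'?¡¿`+^*[]´¨}{,.-;:_<>\n \"")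
--
--     def clean(token):
--         out = []
--         for c in token:
--             if c not in delset:
--                 out.append(c.lower())
--         return ''.join(out)
--
--     listaTratada = [s for s in map(clean, tokens) if s]
--     tokens.sort()
--     return listaTratada
-- ===== Notes on version B (the rewrite author's own statement) =====
-- stated objective: faster
-- what changed: Instead of 60 full replace passes per token followed by a whole-token lowercase and an accumulator append loop, B cleans each token in one fused pass that both skips deletion characters (frozenset membership) and lowercases the kept characters, and builds the result as a map-then-filter comprehension.
import Mathlib
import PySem

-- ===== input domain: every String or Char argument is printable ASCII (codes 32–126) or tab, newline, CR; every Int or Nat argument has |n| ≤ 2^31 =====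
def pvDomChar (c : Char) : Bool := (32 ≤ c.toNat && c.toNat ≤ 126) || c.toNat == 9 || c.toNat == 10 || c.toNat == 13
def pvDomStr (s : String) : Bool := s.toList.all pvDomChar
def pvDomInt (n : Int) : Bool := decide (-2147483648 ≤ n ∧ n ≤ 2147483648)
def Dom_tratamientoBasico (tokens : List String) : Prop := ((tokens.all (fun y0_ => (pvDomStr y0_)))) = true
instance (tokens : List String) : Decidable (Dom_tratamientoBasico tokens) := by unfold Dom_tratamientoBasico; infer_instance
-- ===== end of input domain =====

-- B fuses deletion and lowercasing into one per-character pass per token and builds the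
-- result as map-then-filter instead of A's 60 replace passes plus an accumulator loop.
-- Python A also sorts `tokens` in place (B does the same); the equivalence proved here is about the return value.

-- ===== PORT A =====
def tratamientoBasico (tokens : List String) : List String :=
  let caracteres : List Char := "0123456789ºª!·$%&/()=|@#~€¬'?¡¿`+^*[]´¨}{,.-;:_<>\n \"".toList
  tokens.foldl (fun listaTratada token =>
    -- for i in range(len(caracteres)): token = token.replace(caracteres[i], "")
    let token := (PySem.List.pyRange 0 (caracteres.length : Int) 1).foldl
      (fun t i => PySem.Chars.replace t [PySem.List.pyGetD caracteres i ' '] []) token.toList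
    if token ≠ [] then listaTratada ++ [String.ofList (PySem.Chars.lower token)] else listaTratada) []

-- ===== PORT B =====
-- clean: one recursive pass over the token's characters, dropping deletion chars and
-- lowercasing the kept ones (c.lower() appended to out).
def pvCleanB (delset : PySem.Set Char) : List Char → List Char
  | [] => []
  | c :: t =>
    if delset.contains c then pvCleanB delset t
    else PySem.Chars.lowerChar c :: pvCleanB delset t

def tratamientoBasico_alt (tokens : List String) : List String :=
  let delset : PySem.Set Char := PySem.Set.ofList "0123456789ºª!·$%&/()=|@#~€¬'?¡¿`+^*[]´¨}{,.-;:_<>\n \"".toList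
  -- [s for s in map(clean, tokens) if s]
  (tokens.map (fun token => String.ofList (pvCleanB delset token.toList))).filter (fun s => s ≠ "")

-- ===== PRECONDITION & SPEC =====
def Spec_tratamientoBasico (tokens : List String) (out : List String) : Prop := out = tratamientoBasico_alt tokens
instance (tokens : List String) (out : List String) : Decidable (Spec_tratamientoBasico tokens out) := by unfold Spec_tratamientoBasico; infer_instance

-- ===== CLAIM =====
def Claim_equal_tratamientoBasico : Prop := ∀ (tokens : List String), Dom_tratamientoBasico tokens → Spec_tratamientoBasico tokens (tratamientoBasico tokens)

-- ===== LEMMAS AND PROOFS =====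

-- replace.go for a single-char pattern and empty replacement is a filter
theorem replace_go_single (c : Char) (fuel : Nat) (l acc : List Char) (h : l.length ≤ fuel) :
    PySem.Chars.replace.go [c] [] fuel l acc = acc.reverse ++ l.filter (· ≠ c) := by
  induction fuel generalizing l acc with
  | zero =>
    cases l with
    | nil => simp [PySem.Chars.replace.go]
    | cons x t => simp at h
  | succ n ih =>
    cases l with
    | nil => simp [PySem.Chars.replace.go]
    | cons x t =>
      simp only [List.length_cons, Nat.succ_le_succ_iff] at h
      by_cases hx : x = c
      · subst hx
        rw [show PySem.Chars.replace.go [x] [] (n+1) (x :: t) acc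
              = PySem.Chars.replace.go [x] [] n (List.drop 1 (x :: t)) ([].reverse ++ acc) by
            simp [PySem.Chars.replace.go, List.isPrefixOf]]
        simp only [List.drop_one, List.tail_cons, List.reverse_nil, List.nil_append]
        rw [ih t acc h]
        simp
      · rw [show PySem.Chars.replace.go [c] [] (n+1) (x :: t) acc
              = PySem.Chars.replace.go [c] [] n t (x :: acc) by
            simp [PySem.Chars.replace.go, List.isPrefixOf, Ne.symm hx]]
        rw [ih t (x :: acc) h]
        simp [hx]

theorem replace_single (c : Char) (l : List Char) :
    PySem.Chars.replace l [c] [] = l.filter (· ≠ c) := by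
  rw [PySem.Chars.replace]
  simp only [List.isEmpty_cons, if_false, Bool.false_eq_true]
  exact replace_go_single c l.length l [] le_rfl

-- folding single-char removals over a list of chars is one filter
theorem foldl_replace_filter (cs t : List Char) :
    cs.foldl (fun t c => PySem.Chars.replace t [c] []) t
      = t.filter (fun x => !cs.contains x) := by
  induction cs generalizing t with
  | nil => simp
  | cons c cs ih =>
    simp only [List.foldl_cons]
    rw [replace_single, ih, List.filter_filter]
    apply List.filter_congr
    intro x _
    by_cases hx : x = c <;> simp [hx]

theorem set_contains_ofList (l : List Char) (c : Char) :
    (PySem.Set.ofList l).contains c = l.contains c := by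
  have := PySem.Set.mem_ofList l c
  by_cases h : c ∈ l
  · simp [h, this.mpr h]
  · have : c ∉ PySem.Set.ofList l := fun hc => h (this.mp hc)
    simp [h, this]

-- B's fused pass computes the lowercase of A's filtered token
theorem pvCleanB_eq (delset : PySem.Set Char) (l : List Char) :
    pvCleanB delset l = PySem.Chars.lower (l.filter (fun c => !(delset.contains c))) := by
  induction l with
  | nil => simp [pvCleanB, PySem.Chars.lower]
  | cons c t ih =>
    by_cases hc : c ∈ delset <;>
      simp [pvCleanB, PySem.Set.contains, hc, ih, PySem.Chars.lower]

-- A's accumulator loop equals B's map-then-filter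
theorem foldl_eq_filter_map (g : String → List Char) (tokens : List String) (acc : List String) :
    tokens.foldl (fun la token =>
        if g token ≠ [] then la ++ [String.ofList (PySem.Chars.lower (g token))] else la) acc
      = acc ++ (tokens.map (fun token => String.ofList (PySem.Chars.lower (g token)))).filter
          (fun s => s ≠ "") := by
  induction tokens generalizing acc with
  | nil => simp
  | cons t ts ih =>
    simp only [List.foldl_cons, List.map_cons, List.filter_cons]
    by_cases hg : g t = []
    · rw [if_neg (by simp [hg]), ih]
      have he : String.ofList (PySem.Chars.lower (g t)) = "" := by
        simp [PySem.Chars.lower, hg]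
      simp [he]
    · rw [if_pos (by simp [hg]), ih]
      have hne : String.ofList (PySem.Chars.lower (g t)) ≠ "" := by
        simp [PySem.Chars.lower, hg]
      simp [hne]

-- ===== VERDICT =====
theorem tratamientoBasico_spec : Claim_equal_tratamientoBasico := by
  intro tokens _
  unfold Spec_tratamientoBasico tratamientoBasico tratamientoBasico_alt
  simp only [PySem.List.foldl_pyRange_zero_pyGetD'
      _ ' ' (fun t c => PySem.Chars.replace t [c] []),
    foldl_replace_filter]
  rw [foldl_eq_filter_map
    (fun token => token.toList.filter
      (fun x => !("0123456789ºª!·$%&/()=|@#~€¬'?¡¿`+^*[]´¨}{,.-;:_<>\n \"".toList.contains x)))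
    tokens []]
  simp only [List.nil_append]
  have hmap : ∀ token : String,
      String.ofList (PySem.Chars.lower (token.toList.filter
        (fun x => !("0123456789ºª!·$%&/()=|@#~€¬'?¡¿`+^*[]´¨}{,.-;:_<>\n \"".toList.contains x))))
      = String.ofList (pvCleanB
          (PySem.Set.ofList "0123456789ºª!·$%&/()=|@#~€¬'?¡¿`+^*[]´¨}{,.-;:_<>\n \"".toList) token.toList) := by
    intro token
    rw [pvCleanB_eq]
    have : ∀ x : Char,
        (!("0123456789ºª!·$%&/()=|@#~€¬'?¡¿`+^*[]´¨}{,.-;:_<>\n \"".toList.contains x))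
        = (!((PySem.Set.ofList "0123456789ºª!·$%&/()=|@#~€¬'?¡¿`+^*[]´¨}{,.-;:_<>\n \"".toList).contains x)) := by
      intro x; rw [set_contains_ofList]
    simp only [this]
  simp only [hmap]
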